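-- pv_equiv track=rewrite | github.com/amadeuppereira/IART_FEUP | Atividade Moodle 2/src/solver.py | get_objective_puzzle
-- ===== SOURCE A (Python) =====
-- def get_objective_puzzle(puzzle_size) :
--     ret = []
--     number = 1
--     for i in range(puzzle_size):
--         line = []
--         for j in range(puzzle_size):
--             line.append(number)
--             number += 1
--         ret.append(line)
--     ret[puzzle_size-1][puzzle_size-1] = 0
--     return str(ret)
-- ===== SOURCE B (Python) =====
-- def get_objective_puzzle(puzzle_size):
--     # closed form: cell (i, j) holds i*n + j + 1, except the very last cell which is 0;
--     # the string is built directly with join, no intermediate matrix.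
--     def cell(i, j):
--         v = i * puzzle_size + j + 1
--         return 0 if v == puzzle_size * puzzle_size else v
--     rows = ("[" + ", ".join(str(cell(i, j)) for j in range(puzzle_size)) + "]"
--             for i in range(puzzle_size))
--     return "[" + ", ".join(rows) + "]"
-- ===== Notes on version B (the rewrite author's own statement) =====
-- stated objective: alternative
-- what changed: Replaces A's nested counter loops that build and then mutate a matrix (followed by str()) with a closed-form cell formula i*n+j+1 (0 at the last cell) whose values are formatted directly into the string with join, never materialising the matrix.
import Mathlib
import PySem

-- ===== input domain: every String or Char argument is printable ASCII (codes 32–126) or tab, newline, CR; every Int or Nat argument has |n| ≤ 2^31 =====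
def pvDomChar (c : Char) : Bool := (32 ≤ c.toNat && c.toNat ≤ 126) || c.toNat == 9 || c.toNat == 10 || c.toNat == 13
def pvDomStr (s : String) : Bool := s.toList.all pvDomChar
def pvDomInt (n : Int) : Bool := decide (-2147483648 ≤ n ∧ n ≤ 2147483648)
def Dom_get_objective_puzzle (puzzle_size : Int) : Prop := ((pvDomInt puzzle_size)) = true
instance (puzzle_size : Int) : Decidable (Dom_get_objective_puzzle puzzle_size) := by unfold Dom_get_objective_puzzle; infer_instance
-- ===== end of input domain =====

-- B replaces A's counter loops + matrix mutation + str() with a closed-form cell value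
-- formatted straight into the string (objective: alternative decomposition, same cost).

-- ===== PORT A =====
-- Python 'xs[i] = v' on a list, index i (with Pre_ the index is in range; out of range is Python's IndexError)
def pySetIdx {α : Type} (xs : List α) (i : Int) (f : α → α) : List α :=
  let k : Int := if i < 0 then i + xs.length else i
  if 0 ≤ k then xs.modify k.toNat f else xs

-- str(row) for a Python list of ints
def pyStrRow (row : List Int) : String :=
  "[" ++ PySem.Str.join ", " (row.map PySem.Int.toStr) ++ "]"

-- str(ret) for a Python list of lists of ints
def pyStrMat (m : List (List Int)) : String :=
  "[" ++ PySem.Str.join ", " (m.map pyStrRow) ++ "]"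

def get_objective_puzzle (puzzle_size : Int) : String :=
  -- ret = []; number = 1; the two nested for-loops as folds over range(puzzle_size)
  let st := (PySem.List.pyRange 0 puzzle_size 1).foldl
    (fun (st : List (List Int) × Int) _i =>
      let line := (PySem.List.pyRange 0 puzzle_size 1).foldl
        (fun (ls : List Int × Int) _j => (ls.1 ++ [ls.2], ls.2 + 1)) ([], st.2)
      (st.1 ++ [line.1], line.2)) ([], 1)
  -- ret[puzzle_size-1][puzzle_size-1] = 0
  let ret := pySetIdx st.1 (puzzle_size - 1)
    (fun row => pySetIdx row (puzzle_size - 1) (fun _ => (0 : Int)))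
  pyStrMat ret

-- ===== PORT B =====
def get_objective_puzzle_alt (puzzle_size : Int) : String :=
  let cell : Int → Int → Int := fun i j =>
    let v := i * puzzle_size + j + 1
    if v = puzzle_size * puzzle_size then 0 else v
  let rows := (PySem.List.pyRange 0 puzzle_size 1).map (fun i =>
    "[" ++ PySem.Str.join ", "
      ((PySem.List.pyRange 0 puzzle_size 1).map (fun j => PySem.Int.toStr (cell i j))) ++ "]")
  "[" ++ PySem.Str.join ", " rows ++ "]"

-- ===== PRECONDITION & SPEC =====
-- Pre_ excludes puzzle_size ≤ 0, where A's 'ret[puzzle_size-1]' raises IndexError on the empty list.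
def Pre_get_objective_puzzle (puzzle_size : Int) : Prop := 1 ≤ puzzle_size
instance (puzzle_size : Int) : Decidable (Pre_get_objective_puzzle puzzle_size) := by
  unfold Pre_get_objective_puzzle; infer_instance
def pvWitness_get_objective_puzzle : Int := (3)

def Spec_get_objective_puzzle (puzzle_size : Int) (out : String) : Prop :=
  out = get_objective_puzzle_alt puzzle_size
instance (puzzle_size : Int) (out : String) : Decidable (Spec_get_objective_puzzle puzzle_size out) := by
  unfold Spec_get_objective_puzzle; infer_instance

-- ===== CLAIM (what is proved, stated in full; the proofs are below) =====
def Claim_equal_get_objective_puzzle : Prop := ∀ (puzzle_size : Int), Dom_get_objective_puzzle puzzle_size → Pre_get_objective_puzzle puzzle_size → Spec_get_objective_puzzle puzzle_size (get_objective_puzzle puzzle_size)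

-- ===== LEMMAS AND PROOFS =====

-- the inner loop: appends s, s+1, … and advances the counter by the length of the range
theorem inner_fold {a : Type} (l : List a) (acc : List Int) (s : Int) :
    l.foldl (fun (ls : List Int × Int) _j => (ls.1 ++ [ls.2], ls.2 + 1)) (acc, s)
      = (acc ++ (List.range l.length).map (fun (k : Nat) => (s + k : Int)), s + l.length) := by
  induction l generalizing acc s with
  | nil => simp
  | cons x t ih =>
    simp only [List.foldl_cons]
    rw [ih, Prod.mk.injEq]
    constructor
    · rw [List.length_cons, List.range_succ_eq_map]
      simp only [List.map_cons, List.map_map, Function.comp_def, Nat.cast_zero, add_zero,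
        List.append_assoc, List.singleton_append]
      congr 2
      exact List.map_congr_left (fun k _ => by push_cast; ring)
    · rw [List.length_cons]; push_cast; ring

-- row starting at number s, of length m
def rowFrom (m : Nat) (s : Int) : List Int := (List.range m).map (fun (k : Nat) => (s + k : Int))

-- the outer loop in terms of rowFrom
theorem outer_fold {a b : Type} (m : List b) (l : List a) (acc : List (List Int)) (s : Int) :
    l.foldl
      (fun (st : List (List Int) × Int) _i =>
        (st.1 ++ [(m.foldl
            (fun (ls : List Int × Int) _j => (ls.1 ++ [ls.2], ls.2 + 1)) ([], st.2)).1],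
         (m.foldl
            (fun (ls : List Int × Int) _j => (ls.1 ++ [ls.2], ls.2 + 1)) ([], st.2)).2))
      (acc, s)
      = (acc ++ (List.range l.length).map
            (fun (r : Nat) => rowFrom m.length (s + r * (m.length : Int))),
         s + (l.length : Int) * m.length) := by
  induction l generalizing acc s with
  | nil => simp
  | cons x t ih =>
    simp only [List.foldl_cons]
    rw [inner_fold m ([] : List Int) s]
    simp only [List.nil_append]
    rw [ih, Prod.mk.injEq]
    constructor
    · rw [List.length_cons, List.range_succ_eq_map]
      simp only [List.map_cons, List.map_map, Function.comp_def, Nat.cast_zero, zero_mul,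
        add_zero, List.append_assoc, List.singleton_append]
      refine congrArg (fun z => acc ++ z) ?_
      refine congrArg₂ List.cons rfl ?_
      exact List.map_congr_left (fun r _ => congrArg (rowFrom m.length) (by push_cast; ring))
    · rw [List.length_cons]; push_cast; ring

-- the closed-form cell test: the value hits n*n exactly at the last cell
theorem cell_eq (n : Int) (hn : 1 ≤ n) (r k : Nat) (hr : r < n.toNat) (hk : k < n.toNat) :
    (if (r : Int) * n + (k : Int) + 1 = n * n then (0 : Int) else (r : Int) * n + (k : Int) + 1)
      = (if r = n.toNat - 1 ∧ k = n.toNat - 1 then (0 : Int) else 1 + (r : Int) * n + (k : Int)) := by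
  have hrn : (r : Int) < n := by omega
  have hkn : (k : Int) < n := by omega
  by_cases h : r = n.toNat - 1 ∧ k = n.toNat - 1
  · have hr' : (r : Int) = n - 1 := by omega
    have hk' : (k : Int) = n - 1 := by omega
    rw [hr', hk']
    have : (n - 1) * n + (n - 1) + 1 = n * n := by ring
    simp [this, h]
  · have hne : (r : Int) * n + (k : Int) + 1 ≠ n * n := by
      intro he
      have h1 : (n - (r : Int)) * n = (k : Int) + 1 := by
        linarith [sub_mul n (r : Int) n, he]
      by_cases h2 : 2 ≤ n - (r : Int)
      · have h3 : 2 * n ≤ (n - (r : Int)) * n := mul_le_mul_of_nonneg_right h2 (by omega)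
        linarith
      · have hd1 : n - (r : Int) = 1 := by omega
        rw [hd1, one_mul] at h1
        exact h ⟨by omega, by omega⟩
    simp only [if_neg hne, if_neg h]
    ring

-- A's mutated matrix equals B's closed-form matrix of values
theorem matrices_eq (n : Int) (hn : 1 ≤ n) :
    (((List.range n.toNat).map
        (fun (r : Nat) => rowFrom n.toNat (1 + r * (n.toNat : Int)))).modify
        (n.toNat - 1) (fun row => row.modify (n.toNat - 1) (fun _ => (0 : Int))))
      = (PySem.List.pyRange 0 n 1).map (fun i =>
          (PySem.List.pyRange 0 n 1).map (fun j =>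
            if i * n + j + 1 = n * n then (0 : Int) else i * n + j + 1)) := by
  rw [PySem.List.pyRange_one]
  have hmn : ((n - 0).toNat) = n.toNat := by omega
  rw [hmn]
  apply List.ext_getElem
  · simp
  · intro r h1 h2
    simp only [List.length_modify, List.length_map, List.length_range] at h1
    rw [List.getElem_modify]
    simp only [List.getElem_map, List.getElem_range, zero_add]
    by_cases h : n.toNat - 1 = r
    · rw [if_pos h]
      apply List.ext_getElem
      · simp [rowFrom]
      · intro k hk1 hk2
        simp only [List.length_modify, rowFrom, List.length_map, List.length_range] at hk1
        rw [List.getElem_modify]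
        simp only [rowFrom, List.getElem_map, List.getElem_range]
        have hcell := cell_eq n hn r k h1 hk1
        by_cases hkk : n.toNat - 1 = k
        · rw [if_pos hkk]
          have hv : (r : Int) * n + (k : Int) + 1 = n * n := by
            have hr' : (r : Int) = n - 1 := by omega
            have hk' : (k : Int) = n - 1 := by omega
            rw [hr', hk']; ring
          rw [if_pos hv]
        · rw [if_neg hkk]
          have hne : ¬ (r = n.toNat - 1 ∧ k = n.toNat - 1) := fun hc => hkk hc.2.symm
          rw [if_neg hne] at hcell
          rw [hcell]
          have hcast : ((n.toNat : Int)) = n := by omega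
          rw [hcast]
    · rw [if_neg h]
      apply List.ext_getElem
      · simp [rowFrom]
      · intro k hk1 hk2
        simp only [rowFrom, List.length_map, List.length_range] at hk1
        simp only [rowFrom, List.getElem_map, List.getElem_range]
        have hcell := cell_eq n hn r k h1 hk1
        have hne : ¬ (r = n.toNat - 1 ∧ k = n.toNat - 1) := fun hc => h hc.1.symm
        rw [if_neg hne] at hcell
        rw [hcell]
        have hcast : ((n.toNat : Int)) = n := by omega
        rw [hcast]

-- ===== VERDICT (by name: the statement is the Claim_ definition above) =====
theorem get_objective_puzzle_spec : Claim_equal_get_objective_puzzle := by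
  intro n _hdom hpre
  have hn : 1 ≤ n := hpre
  show get_objective_puzzle n = get_objective_puzzle_alt n
  simp only [get_objective_puzzle, get_objective_puzzle_alt]
  rw [PySem.List.pyRange_one 0 n]
  simp only [List.foldl_map, sub_zero]
  rw [outer_fold (List.range n.toNat) (List.range n.toNat) ([] : List (List Int)) (1 : Int)]
  dsimp only
  simp only [List.length_range, List.nil_append]
  have hset : pySetIdx ((List.range n.toNat).map
      (fun (r : Nat) => rowFrom n.toNat (1 + r * (n.toNat : Int)))) (n - 1)
      (fun row => pySetIdx row (n - 1) (fun _ => (0 : Int)))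
      = ((List.range n.toNat).map
          (fun (r : Nat) => rowFrom n.toNat (1 + r * (n.toNat : Int)))).modify
          (n.toNat - 1) (fun row => row.modify (n.toNat - 1) (fun _ => (0 : Int))) := by
    simp [pySetIdx, hn, show ¬ (n - 1 < 0) from by omega,
      show (n - 1).toNat = n.toNat - 1 from by omega]
  rw [hset, matrices_eq n hn]
  simp [pyStrMat, pyStrRow, List.map_map, Function.comp_def, PySem.List.pyRange_one, zero_add]
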